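-- pv_equiv track=rewrite | github.com/posl/comment_recommendation | script/split_gen/5_time/zh/175_A/4.py | max_rain_days
-- ===== SOURCE A (Python) =====
-- def max_rain_days(s):
--     count = 0
--     max_count = 0
--     for i in range(3):
--         if s[i] == 'R':
--             count += 1
--             if count > max_count:
--                 max_count = count
--         else:
--             count = 0
--     return max_count
-- ===== SOURCE B (Python) =====
-- def max_rain_days(s):
--     a, b, c = s[0] == 'R', s[1] == 'R', s[2] == 'R'
--     if a and b and c:
--         return 3
--     if (a and b) or (b and c):
--         return 2
--     if a or b or c:
--         return 1
--     return 0
-- ===== Notes on version B (the rewrite author's own statement) =====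
-- stated objective: alternative
-- what changed: Replaces the running-counter loop over range(3) by a direct table/arithmetical classification of the three boolean flags s[i]=='R' (the longest run of three cells is a closed-form case split), keeping the same IndexError on strings shorter than 3.
import Mathlib
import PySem

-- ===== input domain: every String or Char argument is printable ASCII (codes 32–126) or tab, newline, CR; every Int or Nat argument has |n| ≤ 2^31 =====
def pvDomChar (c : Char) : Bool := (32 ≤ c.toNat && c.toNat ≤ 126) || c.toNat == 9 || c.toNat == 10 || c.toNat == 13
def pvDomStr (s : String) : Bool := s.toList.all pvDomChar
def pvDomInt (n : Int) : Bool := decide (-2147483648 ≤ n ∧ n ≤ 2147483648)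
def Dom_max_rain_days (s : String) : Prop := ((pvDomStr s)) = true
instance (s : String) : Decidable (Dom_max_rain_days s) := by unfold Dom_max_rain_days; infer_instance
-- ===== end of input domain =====

-- B replaces A's running-counter loop by a direct case analysis of the three flags s[i]=='R' (alternative decomposition, same cost).

-- ===== PORT A =====
-- running counter over for i in range(3); pyGet? none = IndexError, excluded by Pre_
def max_rain_days (s : String) : Int :=
  (((PySem.List.pyRange 0 3 1).foldl (fun (st : Int × Int) (i : Int) =>
      match PySem.Str.pyGet? s i with
      | none => st   -- IndexError: outside Pre_max_rain_days
      | some c =>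
        if c = 'R' then
          let count := st.1 + 1
          (count, if count > st.2 then count else st.2)
        else (0, st.2)) ((0 : Int), (0 : Int)))).2

-- ===== PORT B =====
def max_rain_days_alt (s : String) : Int :=
  match PySem.Str.pyGet? s 0, PySem.Str.pyGet? s 1, PySem.Str.pyGet? s 2 with
  | some x, some y, some z =>
    let a := x = 'R'
    let b := y = 'R'
    let c := z = 'R'
    if a ∧ b ∧ c then 3
    else if (a ∧ b) ∨ (b ∧ c) then 2
    else if a ∨ b ∨ c then 1
    else 0
  | _, _, _ => 0   -- IndexError: outside Pre_max_rain_days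

-- ===== PRECONDITION & SPEC =====
-- A indexes s[0], s[1], s[2]; Pre_ excludes strings shorter than 3, on which A raises IndexError.
def Pre_max_rain_days (s : String) : Prop := 3 ≤ s.toList.length
instance (s : String) : Decidable (Pre_max_rain_days s) := by unfold Pre_max_rain_days; infer_instance
def pvWitness_max_rain_days : String := "RSR"

def Spec_max_rain_days (s : String) (out : Int) : Prop := out = max_rain_days_alt s
instance (s : String) (out : Int) : Decidable (Spec_max_rain_days s out) := by unfold Spec_max_rain_days; infer_instance

-- ===== CLAIM (what is proved, stated in full; the proofs are below) =====
def Claim_equal_max_rain_days : Prop := ∀ (s : String), Dom_max_rain_days s → Pre_max_rain_days s → Spec_max_rain_days s (max_rain_days s)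

-- ===== LEMMAS AND PROOFS =====

-- ===== VERDICT (by name: the statement is the Claim_ definition above) =====
theorem max_rain_days_spec : Claim_equal_max_rain_days := by
  intro s _ hpre
  unfold Spec_max_rain_days max_rain_days max_rain_days_alt Pre_max_rain_days at *
  obtain ⟨x, y, z, t, h⟩ : ∃ x y z t, s.toList = x :: y :: z :: t := by
    match hl : s.toList with
    | [] => simp [hl] at hpre
    | [_] => simp [hl] at hpre
    | [_, _] => simp [hl] at hpre
    | x :: y :: z :: t => exact ⟨x, y, z, t, rfl⟩
  have h0 : PySem.Str.pyGet? s 0 = some x := by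
    simpa [h] using PySem.Str.pyGet?_natCast s (0 : Nat)
  have h1 : PySem.Str.pyGet? s 1 = some y := by
    simpa [h] using PySem.Str.pyGet?_natCast s (1 : Nat)
  have h2 : PySem.Str.pyGet? s 2 = some z := by
    simpa [h] using PySem.Str.pyGet?_natCast s (2 : Nat)
  have hr : PySem.List.pyRange 0 3 1 = [0, 1, 2] := by decide
  rw [hr]
  simp only [List.foldl, h0, h1, h2]
  by_cases hx : x = 'R' <;> by_cases hy : y = 'R' <;> by_cases hz : z = 'R' <;>
    simp [hx, hy, hz]
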